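-- pv_equiv track=rewrite | github.com/afzalsiddique/problem-solving | Problem_Solving_Python/leetcode/lc2135.py | wordCount
-- ===== SOURCE A (Python) =====
-- import itertools; import math; import operator; import random; import string; from bisect import *; from collections import deque, defaultdict, Counter, OrderedDict; from functools import reduce; from heapq import *; import unittest; from typing import List; import functools
-- import itertools; import math; import operator; import random; import string; from bisect import *; from collections import deque, defaultdict, Counter, OrderedDict; from functools import reduce; from heapq import *; import unittest; from typing import List; import functools
--
-- def wordCount(startWords: List[str], targetWords: List[str]) -> int:
--     def turnOn(mask,i): return mask|(1<<i)
--     def turnOff(mask,i): return mask-(1<<i)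
--     def isOn(mask,i): return (mask>>i)&1
--     def createMask(word):
--         mask=0
--         for c in word:
--             mask=turnOn(mask,ord(c)-ord('a'))
--         return mask
--
--     sett=set()
--     for w in startWords:
--         sett.add(createMask(w))
--
--     res=0
--     for word in targetWords:
--         mask=createMask(word)
--         flag=False
--         for c in string.ascii_lowercase:
--             idx=ord(c)-ord('a')
--             if isOn(mask,idx):
--                 newMask=turnOff(mask,idx)
--                 if newMask in sett:
--                     flag=True
--                     break
--         res+=flag
--     return res
-- ===== SOURCE B (Python) =====
-- def wordCount(startWords, targetWords):
--     # Forward expansion: for each start word's mask, record every mask obtained by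
--     # turning ON one currently-OFF letter; each target is then a single set lookup.
--     expansions = set()
--     for w in startWords:
--         m = 0
--         for c in w:
--             m |= 1 << (ord(c) - 97)
--         for i in range(26):
--             if not (m >> i) & 1:
--                 expansions.add(m | (1 << i))
--     res = 0
--     for w in targetWords:
--         m = 0
--         for c in w:
--             m |= 1 << (ord(c) - 97)
--         if m in expansions:
--             res += 1
--     return res
-- ===== Notes on version B (the rewrite author's own statement) =====
-- stated objective: alternative
-- what changed: Instead of trying to remove each of the 26 letters from every target mask and probing the start-mask set, B precomputes the set of all one-letter forward expansions of the start masks (turning on each OFF bit), so each target is answered by a single set membership test with no inner letter loop.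
import Mathlib
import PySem

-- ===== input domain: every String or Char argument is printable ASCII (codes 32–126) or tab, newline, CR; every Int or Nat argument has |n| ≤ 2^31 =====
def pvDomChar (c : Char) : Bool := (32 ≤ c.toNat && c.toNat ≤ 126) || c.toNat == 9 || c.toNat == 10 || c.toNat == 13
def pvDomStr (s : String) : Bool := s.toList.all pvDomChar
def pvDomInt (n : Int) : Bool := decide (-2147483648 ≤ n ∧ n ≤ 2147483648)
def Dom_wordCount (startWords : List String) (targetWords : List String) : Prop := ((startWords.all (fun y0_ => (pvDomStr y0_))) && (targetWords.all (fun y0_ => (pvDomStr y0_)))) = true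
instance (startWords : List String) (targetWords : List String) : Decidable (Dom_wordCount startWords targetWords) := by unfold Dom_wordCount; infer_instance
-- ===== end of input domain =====

-- B replaces A's per-target scan over the 26 removable letters by a precomputed set of all
-- one-letter forward expansions of the start masks, so each target is one set lookup (alternative decomposition).

-- ===== PORT A =====
-- createMask: under Pre_ every character has code ≥ 97, so Python's `ord(c) - 97` equals the Nat subtraction `c.toNat - 97`.
def pvCreateMaskA (word : String) : Nat :=
  word.toList.foldl (fun mask c => mask ||| (1 <<< (c.toNat - 97))) 0

-- the inner `for c in string.ascii_lowercase: … break` loop of A (flag starts False; break on first hit)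
def pvFlagLoopA (sett : PySem.Set Nat) (mask : Nat) : List Char → Bool
  | [] => false
  | c :: rest =>
    let idx := c.toNat - 97
    if (mask >>> idx) &&& 1 = 1 then
      if PySem.Set.contains sett (mask - (1 <<< idx)) then true
      else pvFlagLoopA sett mask rest
    else pvFlagLoopA sett mask rest

def wordCount (startWords : List String) (targetWords : List String) : Int :=
  let sett := startWords.foldl (fun s w => PySem.Set.add s (pvCreateMaskA w)) PySem.Set.empty
  targetWords.foldl (fun res word =>
    res + (if pvFlagLoopA sett (pvCreateMaskA word) "abcdefghijklmnopqrstuvwxyz".toList then 1 else 0)) 0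

-- ===== PORT B =====
def pvCreateMaskB (word : String) : Nat :=
  word.toList.foldl (fun m c => m ||| (1 <<< (c.toNat - 97))) 0

def wordCount_alt (startWords : List String) (targetWords : List String) : Int :=
  let exps := startWords.foldl (fun s w =>
      let m := pvCreateMaskB w
      (List.range 26).foldl (fun s i =>
        if (m >>> i) &&& 1 = 0 then PySem.Set.add s (m ||| (1 <<< i)) else s) s)
    PySem.Set.empty
  targetWords.foldl (fun res w =>
    if PySem.Set.contains exps (pvCreateMaskB w) then res + 1 else res) 0

-- ===== PRECONDITION & SPEC =====
-- A raises ValueError ("negative shift count") on any word containing a character below 'a'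
-- (code < 97): `1 << (ord(c) - 97)` with a negative shift.  Pre_ excludes exactly those inputs.
def Pre_wordCount (startWords : List String) (targetWords : List String) : Prop :=
  ((startWords.all fun w => w.toList.all fun c => 97 ≤ c.toNat) &&
   (targetWords.all fun w => w.toList.all fun c => 97 ≤ c.toNat)) = true
instance (startWords : List String) (targetWords : List String) : Decidable (Pre_wordCount startWords targetWords) := by unfold Pre_wordCount; infer_instance

def pvWitness_wordCount : List String × List String := (["a"], ["ab"])

def Spec_wordCount (startWords : List String) (targetWords : List String) (out : Int) : Prop := out = wordCount_alt startWords targetWords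
instance (startWords : List String) (targetWords : List String) (out : Int) : Decidable (Spec_wordCount startWords targetWords out) := by unfold Spec_wordCount; infer_instance

-- ===== CLAIM (what is proved, stated in full; the proofs are below) =====
def Claim_equal_wordCount : Prop := ∀ (startWords : List String) (targetWords : List String), Dom_wordCount startWords targetWords → Pre_wordCount startWords targetWords → Spec_wordCount startWords targetWords (wordCount startWords targetWords)

-- ===== LEMMAS AND PROOFS =====

-- bit arithmetic on Nat masks --------------------------------------------------------------
theorem pvLorPow : ∀ (i x : Nat), x / 2^i % 2 = 0 → x ||| 2^i = x + 2^i := by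
  intro i
  induction i with
  | zero =>
    intro x h
    simp at h
    have hx : x = Nat.bit false (x/2) := by simp [Nat.bit_val]; omega
    have h1 : (2:Nat)^0 = Nat.bit true 0 := rfl
    rw [hx, h1, Nat.lor_bit]
    simp [Nat.bit_val]
  | succ i ih =>
    intro x h
    have hdiv : x / 2^(i+1) = x / 2 / 2^i := by
      rw [Nat.div_div_eq_div_mul]; ring_nf
    have h' : x / 2 / 2^i % 2 = 0 := by rw [← hdiv]; exact h
    have hb : x = Nat.bit (decide (x % 2 = 1)) (x/2) := by
      rcases Nat.mod_two_eq_zero_or_one x with h2 | h2 <;> simp [h2, Nat.bit_val] <;> omega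
    have hp : (2:Nat)^(i+1) = Nat.bit false (2^i) := by simp [Nat.bit_val]; ring
    rw [hb, hp, Nat.lor_bit, ih _ h']
    rcases Nat.mod_two_eq_zero_or_one x with h2 | h2 <;> simp [h2, Nat.bit_val] <;> omega

theorem pvShAnd (x i : Nat) : (x >>> i) &&& 1 = x / 2^i % 2 := by
  rw [Nat.shiftRight_eq_div_pow, Nat.and_one_is_mod]

theorem pvAddBit (i x : Nat) (h : x / 2^i % 2 = 0) : (x + 2^i) / 2^i % 2 = 1 := by
  rw [Nat.add_div_right _ (Nat.two_pow_pos i)]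
  omega

theorem pvSubF (i x : Nat) (h : x / 2^i % 2 = 1) :
    2^i ≤ x ∧ (x - 2^i) / 2^i % 2 = 0 ∧ (x - 2^i) + 2^i = x := by
  have hpos : 0 < 2^i := Nat.two_pow_pos i
  have hq : 1 ≤ x / 2^i := by
    rcases Nat.eq_zero_or_pos (x / 2^i) with h0 | h0
    · rw [h0] at h; simp at h
    · exact h0
  have hle : 2^i ≤ x := by
    have := (Nat.le_div_iff_mul_le hpos).mp hq; omega
  have heq : (x - 2^i) + 2^i = x := by omega
  have h2 : ((x - 2^i) + 2^i) / 2^i = (x - 2^i)/2^i + 1 := Nat.add_div_right _ hpos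
  rw [heq] at h2
  exact ⟨hle, by omega, heq⟩

-- membership in the two foldl-built sets ---------------------------------------------------
theorem pvMemS (L : List String) : ∀ (s : PySem.Set Nat) (x : Nat),
    (x ∈ L.foldl (fun s w => PySem.Set.add s (pvCreateMaskA w)) s) ↔
      x ∈ s ∨ ∃ w ∈ L, x = pvCreateMaskA w := by
  induction L with
  | nil => simp [List.foldl]
  | cons w L ih =>
    intro s x
    rw [List.foldl_cons, ih, PySem.Set.mem_add]
    constructor
    · rintro ((h | h) | ⟨w', hw', rfl⟩)
      · exact Or.inl h
      · exact Or.inr ⟨w, List.mem_cons_self .., h⟩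
      · exact Or.inr ⟨w', List.mem_cons_of_mem _ hw', rfl⟩
    · rintro (h | ⟨w', hw', rfl⟩)
      · exact Or.inl (Or.inl h)
      · rcases List.mem_cons.mp hw' with rfl | hw'
        · exact Or.inl (Or.inr rfl)
        · exact Or.inr ⟨w', hw', rfl⟩

theorem pvMemInner (m : Nat) (R : List Nat) : ∀ (s : PySem.Set Nat) (x : Nat),
    (x ∈ R.foldl (fun s i => if (m >>> i) &&& 1 = 0 then PySem.Set.add s (m ||| (1 <<< i)) else s) s) ↔
      x ∈ s ∨ ∃ i ∈ R, (m >>> i) &&& 1 = 0 ∧ x = m ||| (1 <<< i) := by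
  induction R with
  | nil => simp [List.foldl]
  | cons i R ih =>
    intro s x
    rw [List.foldl_cons]
    by_cases hc : (m >>> i) &&& 1 = 0
    · rw [if_pos hc, ih, PySem.Set.mem_add]
      constructor
      · rintro ((h | h) | ⟨i', hi', hc', rfl⟩)
        · exact Or.inl h
        · exact Or.inr ⟨i, List.mem_cons_self .., hc, h⟩
        · exact Or.inr ⟨i', List.mem_cons_of_mem _ hi', hc', rfl⟩
      · rintro (h | ⟨i', hi', hc', rfl⟩)
        · exact Or.inl (Or.inl h)
        · rcases List.mem_cons.mp hi' with rfl | hi'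
          · exact Or.inl (Or.inr rfl)
          · exact Or.inr ⟨i', hi', hc', rfl⟩
    · rw [if_neg hc, ih]
      constructor
      · rintro (h | ⟨i', hi', hc', rfl⟩)
        · exact Or.inl h
        · exact Or.inr ⟨i', List.mem_cons_of_mem _ hi', hc', rfl⟩
      · rintro (h | ⟨i', hi', hc', rfl⟩)
        · exact Or.inl h
        · rcases List.mem_cons.mp hi' with rfl | hi'
          · exact absurd hc' hc
          · exact Or.inr ⟨i', hi', hc', rfl⟩

theorem pvMemE (L : List String) : ∀ (s : PySem.Set Nat) (x : Nat),
    (x ∈ L.foldl (fun s w =>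
        let m := pvCreateMaskB w
        (List.range 26).foldl (fun s i =>
          if (m >>> i) &&& 1 = 0 then PySem.Set.add s (m ||| (1 <<< i)) else s) s) s) ↔
      x ∈ s ∨ ∃ w ∈ L, ∃ i ∈ List.range 26,
        ((pvCreateMaskB w) >>> i) &&& 1 = 0 ∧ x = (pvCreateMaskB w) ||| (1 <<< i) := by
  induction L with
  | nil => simp [List.foldl]
  | cons w L ih =>
    intro s x
    rw [List.foldl_cons]
    show (x ∈ L.foldl _ ((List.range 26).foldl _ s)) ↔ _
    rw [ih, pvMemInner]
    constructor
    · rintro ((h | ⟨i, hi, hc, rfl⟩) | ⟨w', hw', hrest⟩)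
      · exact Or.inl h
      · exact Or.inr ⟨w, List.mem_cons_self .., i, hi, hc, rfl⟩
      · exact Or.inr ⟨w', List.mem_cons_of_mem _ hw', hrest⟩
    · rintro (h | ⟨w', hw', hrest⟩)
      · exact Or.inl (Or.inl h)
      · rcases List.mem_cons.mp hw' with rfl | hw'
        · exact Or.inl (Or.inr hrest)
        · exact Or.inr ⟨w', hw', hrest⟩

-- A's flag loop, characterised -------------------------------------------------------------
theorem pvFlagIff (sett : PySem.Set Nat) (mask : Nat) : ∀ (letters : List Char),
    pvFlagLoopA sett mask letters = true ↔
      ∃ c ∈ letters, (mask >>> (c.toNat - 97)) &&& 1 = 1 ∧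
        (mask - (1 <<< (c.toNat - 97))) ∈ sett := by
  intro letters
  induction letters with
  | nil => simp [pvFlagLoopA]
  | cons c rest ih =>
    rw [pvFlagLoopA]
    by_cases h1 : (mask >>> (c.toNat - 97)) &&& 1 = 1
    · rw [if_pos h1]
      by_cases h2 : PySem.Set.contains sett (mask - (1 <<< (c.toNat - 97))) = true
      · rw [if_pos h2]
        simp only [true_iff]
        exact ⟨c, List.mem_cons_self .., h1, (PySem.Set.contains_iff ..).mp h2⟩
      · rw [if_neg h2, ih]
        constructor
        · rintro ⟨c', hc', hb, hm⟩
          exact ⟨c', List.mem_cons_of_mem _ hc', hb, hm⟩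
        · rintro ⟨c', hc', hb, hm⟩
          rcases List.mem_cons.mp hc' with rfl | hc'
          · exact absurd ((PySem.Set.contains_iff ..).mpr hm) h2
          · exact ⟨c', hc', hb, hm⟩
    · rw [if_neg h1, ih]
      constructor
      · rintro ⟨c', hc', hb, hm⟩
        exact ⟨c', List.mem_cons_of_mem _ hc', hb, hm⟩
      · rintro ⟨c', hc', hb, hm⟩
        rcases List.mem_cons.mp hc' with rfl | hc'
        · exact absurd hb h1
        · exact ⟨c', hc', hb, hm⟩

-- a..z indices are exactly range 26
theorem pvAZ : "abcdefghijklmnopqrstuvwxyz".toList.map (fun c => c.toNat - 97) = List.range 26 := by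
  decide

-- the per-target-word booleans of the two ports agree (for every word, any input lists)
theorem pvPointwise (startWords : List String) (word : String) :
    pvFlagLoopA
        (startWords.foldl (fun s w => PySem.Set.add s (pvCreateMaskA w)) PySem.Set.empty)
        (pvCreateMaskA word) "abcdefghijklmnopqrstuvwxyz".toList
      = PySem.Set.contains
          (startWords.foldl (fun s w =>
            let m := pvCreateMaskB w
            (List.range 26).foldl (fun s i =>
              if (m >>> i) &&& 1 = 0 then PySem.Set.add s (m ||| (1 <<< i)) else s) s)
            PySem.Set.empty)
          (pvCreateMaskB word) := by
  have hmask : pvCreateMaskB = pvCreateMaskA := rfl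
  rw [Bool.eq_iff_iff, pvFlagIff, PySem.Set.contains_iff, pvMemE]
  simp only [PySem.Set.empty, List.not_mem_nil, false_or]
  rw [hmask]
  set mask := pvCreateMaskA word with hm
  -- rephrase A's letter existential over indices in range 26
  have hAidx : (∃ c ∈ "abcdefghijklmnopqrstuvwxyz".toList,
        (mask >>> (c.toNat - 97)) &&& 1 = 1 ∧
          (mask - (1 <<< (c.toNat - 97))) ∈
            (startWords.foldl (fun s w => PySem.Set.add s (pvCreateMaskA w)) ([] : PySem.Set Nat))) ↔
      (∃ i ∈ List.range 26, (mask >>> i) &&& 1 = 1 ∧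
          (mask - (1 <<< i)) ∈
            (startWords.foldl (fun s w => PySem.Set.add s (pvCreateMaskA w)) ([] : PySem.Set Nat))) := by
    rw [← pvAZ]
    constructor
    · rintro ⟨c, hc, h⟩; exact ⟨c.toNat - 97, List.mem_map_of_mem hc, h⟩
    · rintro ⟨i, hi, h⟩
      rcases List.mem_map.mp hi with ⟨c, hc, rfl⟩
      exact ⟨c, hc, h⟩
  rw [hAidx]
  constructor
  · rintro ⟨i, hi, hb, hmem⟩
    rcases (pvMemS startWords ([] : PySem.Set Nat) _).mp hmem with h0 | ⟨w, hw, heq⟩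
    · simp at h0
    · have hb' : mask / 2^i % 2 = 1 := by rw [← pvShAnd]; exact hb
      obtain ⟨hle, hz, hadd⟩ := pvSubF i mask hb'
      have hsh : (1 : Nat) <<< i = 2^i := Nat.one_shiftLeft i
      rw [hsh] at heq
      refine ⟨w, hw, i, hi, ?_, ?_⟩
      · rw [pvShAnd, ← heq]; exact hz
      · rw [hsh, ← heq, pvLorPow i _ hz, hadd]
  · rintro ⟨w, hw, i, hi, hz, heq⟩
    have hsh : (1 : Nat) <<< i = 2^i := Nat.one_shiftLeft i
    rw [pvShAnd] at hz
    rw [hsh] at heq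
    have hor := pvLorPow i (pvCreateMaskA w) hz
    refine ⟨i, hi, ?_, ?_⟩
    · rw [pvShAnd, heq, hor]
      exact pvAddBit i _ hz
    · rw [hsh, heq, hor, Nat.add_sub_cancel]
      exact (pvMemS startWords ([] : PySem.Set Nat) _).mpr (Or.inr ⟨w, hw, rfl⟩)

-- ===== VERDICT (by name: the statement is the Claim_ definition above) =====
theorem wordCount_spec : Claim_equal_wordCount := by
  intro startWords targetWords hD hP
  clear hD hP
  unfold Spec_wordCount wordCount wordCount_alt
  simp only []
  induction targetWords using List.reverseRecOn with
  | nil => rfl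
  | append_singleton ts t ih =>
    rw [List.foldl_append, List.foldl_append, ih, List.foldl_cons, List.foldl_nil,
      List.foldl_cons, List.foldl_nil, pvPointwise]
    split <;> ring
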